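-- pv_equiv track=rewrite | github.com/Yashmhatre2512/clipzy_studio | aivideogen/utility/video/video_search_query_generator.py | merge_empty_intervals
-- ===== SOURCE A (Python) =====
-- def merge_empty_intervals(segments, duration: int = 60):
--     """
--     Merge consecutive None intervals with previous valid URL.
--     If everything is None or empty, return fallback covering full duration.
--     """
--     if not segments:
--         return [[(0, duration), None]]
--
--     merged = []
--     i = 0
--     while i < len(segments):
--         interval, url = segments[i]
--         if url is None:
--             j = i + 1
--             while j < len(segments) and segments[j][1] is None:
--                 j += 1
--
--             if merged and merged[-1][1] is not None:
--                 prev_interval, prev_url = merged[-1]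
--                 merged[-1] = [[prev_interval[0], segments[j-1][0][1]], prev_url]
--             else:
--                 merged.append([interval, None])
--             i = j
--         else:
--             merged.append([interval, url])
--             i += 1
--
--     # Fallback if all URLs are None
--     if all(url is None for _, url in merged):
--         return [[(0, duration), None]]
--
--     return merged
-- ===== SOURCE B (Python) =====
-- def merge_empty_intervals(segments, duration: int = 60):
--     """Single flat pass: extend the last URL-bearing entry over following None
--     segments; keep only a leading None (everything-None falls back anyway)."""
--     merged = []
--     for interval, url in segments:
--         if url is not None:
--             merged.append([interval, url])
--         elif merged and merged[-1][1] is not None: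
--             prev_interval, prev_url = merged[-1]
--             merged[-1] = [[prev_interval[0], interval[1]], prev_url]
--         elif not merged:
--             merged.append([interval, None])
--         # else: a non-leading None run already represented; drop it
--     if all(url is None for _, url in merged):
--         return [[(0, duration), None]]
--     return merged
-- ===== Notes on version B (the rewrite author's own statement) =====
-- stated objective: simpler
-- what changed: Replaced A's index-driven while loop with an inner run-scanning while and i=j jumps by one flat for-loop over the segments that updates the last merged entry in place; the empty-input guard disappears because the all-None fallback already covers it.
import Mathlib
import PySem

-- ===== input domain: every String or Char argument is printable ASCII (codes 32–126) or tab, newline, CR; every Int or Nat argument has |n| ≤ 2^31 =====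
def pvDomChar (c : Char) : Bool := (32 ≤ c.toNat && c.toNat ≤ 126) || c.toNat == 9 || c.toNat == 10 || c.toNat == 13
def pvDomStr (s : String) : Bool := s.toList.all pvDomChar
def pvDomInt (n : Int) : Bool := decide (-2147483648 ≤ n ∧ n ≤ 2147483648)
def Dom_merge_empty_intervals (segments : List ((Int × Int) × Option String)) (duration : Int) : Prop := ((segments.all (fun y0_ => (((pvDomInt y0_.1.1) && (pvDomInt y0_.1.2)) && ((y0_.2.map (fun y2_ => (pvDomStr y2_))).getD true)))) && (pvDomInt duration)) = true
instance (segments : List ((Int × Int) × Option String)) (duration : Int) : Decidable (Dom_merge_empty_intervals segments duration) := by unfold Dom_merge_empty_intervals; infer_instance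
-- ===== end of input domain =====

-- B rewrites A's nested while loops (inner None-run scan and i=j jumps) as one flat
-- fold over the segments that updates the last merged entry in place ('simpler').

-- ===== PORT A =====
-- inner while: 'while j < len(segments) and segments[j][1] is None: j += 1'
def pvScan (segs : List ((Int × Int) × Option String)) (j : Nat) : Nat :=
  if _h : j < segs.length ∧ (segs.getD j default).2 = none then pvScan segs (j + 1) else j
termination_by segs.length - j

lemma pvScan_ge (segs : List ((Int × Int) × Option String)) (j : Nat) : j ≤ pvScan segs j := by
  fun_induction pvScan segs j with
  | case1 j h ih => omega
  | case2 j h => omega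

-- outer while over index i with accumulator 'merged'; all indices used are provably in
-- range, so Python's segments[k] is ported as getD (exact here)
def pvALoop (segs : List ((Int × Int) × Option String)) (i : Nat)
    (merged : List ((Int × Int) × Option String)) : List ((Int × Int) × Option String) :=
  if _h : i < segs.length then
    let s := segs.getD i default
    match s.2 with
    | none =>
      let j := pvScan segs (i + 1)
      let merged' :=
        match merged.getLast? with
        | some (pi, some pu) => merged.dropLast ++ [((pi.1, (segs.getD (j - 1) default).1.2), some pu)]
        | _ => merged ++ [(s.1, none)]
      pvALoop segs j merged'
    | some u => pvALoop segs (i + 1) (merged ++ [(s.1, some u)])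
  else merged
termination_by segs.length - i
decreasing_by
  · have := pvScan_ge segs (i + 1); omega
  · omega

def merge_empty_intervals (segments : List ((Int × Int) × Option String)) (duration : Int) : List ((Int × Int) × Option String) :=
  if segments = [] then [((0, duration), none)]
  else
    let merged := pvALoop segments 0 []
    if merged.all (fun p => p.2.isNone) then [((0, duration), none)] else merged

-- ===== PORT B =====
def pvBStep (merged : List ((Int × Int) × Option String)) (s : (Int × Int) × Option String) : List ((Int × Int) × Option String) :=
  match s.2 with
  | some u => merged ++ [(s.1, some u)]
  | none =>
    match merged.getLast? with
    | some (pi, some pu) => merged.dropLast ++ [((pi.1, s.1.2), some pu)]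
    | some (_, none) => merged
    | none => [(s.1, none)]

def merge_empty_intervals_alt (segments : List ((Int × Int) × Option String)) (duration : Int) : List ((Int × Int) × Option String) :=
  let merged := segments.foldl pvBStep []
  if merged.all (fun p => p.2.isNone) then [((0, duration), none)] else merged

-- ===== PRECONDITION & SPEC =====
def Spec_merge_empty_intervals (segments : List ((Int × Int) × Option String)) (duration : Int) (out : List ((Int × Int) × Option String)) : Prop := out = merge_empty_intervals_alt segments duration
instance (segments : List ((Int × Int) × Option String)) (duration : Int) (out : List ((Int × Int) × Option String)) : Decidable (Spec_merge_empty_intervals segments duration out) := by unfold Spec_merge_empty_intervals; infer_instance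

-- ===== CLAIM (what is proved, stated in full; the proofs are below) =====
def Claim_equal_merge_empty_intervals : Prop := ∀ (segments : List ((Int × Int) × Option String)) (duration : Int), Dom_merge_empty_intervals segments duration → Spec_merge_empty_intervals segments duration (merge_empty_intervals segments duration)

-- ===== LEMMAS AND PROOFS =====

-- the inner while computes: j plus the length of the None-prefix of (segs.drop j)
lemma pvScan_eq (segs : List ((Int × Int) × Option String)) (j : Nat) :
    pvScan segs j = j + ((segs.drop j).takeWhile (fun s => s.2.isNone)).length := by
  fun_induction pvScan segs j with
  | case1 j h ih =>
    obtain ⟨hj, hn⟩ := h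
    have hd : segs.drop j = segs[j] :: segs.drop (j + 1) := List.drop_eq_getElem_cons hj
    have hg : segs.getD j default = segs[j] := List.getD_eq_getElem segs default hj
    have hp : (segs[j]).2.isNone = true := by
      rw [← hg]
      exact Option.isNone_iff_eq_none.mpr hn
    rw [ih, hd, List.takeWhile_cons, hp]
    simp
    omega
  | case2 j h =>
    rcases Nat.lt_or_ge j segs.length with hj | hj
    · have hd : segs.drop j = segs[j] :: segs.drop (j + 1) := List.drop_eq_getElem_cons hj
      have hg : segs.getD j default = segs[j] := List.getD_eq_getElem segs default hj
      have hn : ¬ (segs.getD j default).2 = none := fun hc => h ⟨hj, hc⟩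
      have hp : (segs[j]).2.isNone = false := by
        rw [← hg]; cases hns : (segs.getD j default).2 <;> simp_all
      rw [hd, List.takeWhile_cons, hp]
      simp
    · simp [List.drop_eq_nil_of_le hj]

-- folding B's step over an all-None run, starting from a state ending in a URL entry,
-- rewrites that entry's end to the run's last end (tracked by a simple foldl)
lemma foldB_run_extend (run : List ((Int × Int) × Option String))
    (hrun : ∀ s ∈ run, s.2 = none) (M : List ((Int × Int) × Option String))
    (a b : Int) (u : String) :
    run.foldl pvBStep (M ++ [((a, b), some u)]) =
      M ++ [((a, run.foldl (fun _ s => s.1.2) b), some u)] := by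
  induction run generalizing b with
  | nil => simp
  | cons s t ih =>
    have hs : s.2 = none := hrun s (by simp)
    have hstep : pvBStep (M ++ [((a, b), some u)]) s = M ++ [((a, s.1.2), some u)] := by
      simp [pvBStep, hs]
    simp only [List.foldl_cons, hstep]
    exact ih (fun x hx => hrun x (by simp [hx])) s.1.2

-- folding B's step over an all-None run leaves a lone leading-None state unchanged
lemma foldB_run_skip (run : List ((Int × Int) × Option String))
    (hrun : ∀ s ∈ run, s.2 = none) (x : Int × Int) :
    run.foldl pvBStep [(x, none)] = [(x, none)] := by
  induction run with
  | nil => rfl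
  | cons s t ih =>
    have hs : s.2 = none := hrun s (by simp)
    have hstep : pvBStep [(x, none)] s = [(x, none)] := by simp [pvBStep, hs]
    simp only [List.foldl_cons, hstep]
    exact ih (fun y hy => hrun y (by simp [hy]))

-- reading the element at index run.length of s :: (run ++ rest) = the end tracked by the foldl
lemma getD_run_last (run : List ((Int × Int) × Option String))
    (s : (Int × Int) × Option String) (rest : List ((Int × Int) × Option String)) :
    ((s :: (run ++ rest)).getD run.length default).1.2 =
      run.foldl (fun _ x => x.1.2) s.1.2 := by
  induction run generalizing s with
  | nil => rfl
  | cons r t ih => simpa using ih r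

-- invariant: whenever the accumulated 'merged' ends in a None entry, the current
-- segment (if any) carries a URL — exactly the states A's outer loop can reach
def pvInv (segs : List ((Int × Int) × Option String)) (i : Nat)
    (merged : List ((Int × Int) × Option String)) : Prop :=
  ∀ x, merged.getLast? = some x → x.2 = none →
    ∀ _ : i < segs.length, (segs.getD i default).2 ≠ none

lemma aloop_eq_foldB (segs : List ((Int × Int) × Option String)) (i : Nat)
    (merged : List ((Int × Int) × Option String)) :
    pvInv segs i merged → pvALoop segs i merged = (segs.drop i).foldl pvBStep merged := by
  fun_induction pvALoop segs i merged with
  | case1 i merged hi s hs j merged' ih =>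
    intro hinv
    -- s is the segment at i and its url is none
    have hd1 : segs.drop i = s :: segs.drop (i + 1) := by
      have := List.drop_eq_getElem_cons hi
      rwa [← List.getD_eq_getElem segs default hi] at this
    set run := (segs.drop (i + 1)).takeWhile (fun s => s.2.isNone) with hrundef
    have hj : j = i + 1 + run.length := pvScan_eq segs (i + 1)
    clear_value j
    have hsplit : segs.drop (i + 1) = run ++ (segs.drop (i + 1)).dropWhile (fun s => s.2.isNone) := by
      rw [hrundef, List.takeWhile_append_dropWhile]
    have hrun : ∀ x ∈ run, x.2 = none := by
      intro x hx
      have := List.mem_takeWhile_imp hx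
      simpa [Option.isNone_iff_eq_none] using this
    set rest := (segs.drop (i + 1)).dropWhile (fun s => s.2.isNone) with hrestdef
    have hdropj : segs.drop j = rest :=
      calc segs.drop j = (segs.drop (i + 1)).drop run.length := by
            rw [List.drop_drop]
            congr 1
        _ = (run ++ rest).drop run.length := by rw [hsplit]
        _ = rest := List.drop_left
    -- the head of rest (if any) has a URL
    have hresthead : ∀ x, rest.head? = some x → x.2 ≠ none := by
      intro x hx hxn
      have h0 := List.head?_dropWhile_not (fun s : (Int × Int) × Option String => s.2.isNone) (segs.drop (i + 1))
      rw [← hrestdef, hx] at h0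
      simp [hxn] at h0
    -- value A writes as the new end
    have hend : (segs.getD (j - 1) default).1.2 = run.foldl (fun _ x => x.1.2) s.1.2 := by
      have h1 : segs.drop i = s :: (run ++ rest) := by rw [hd1, hsplit]
      have hidx : j - 1 = i + run.length := by omega
      have h2 : segs.getD (j - 1) default = (segs.drop i).getD (run.length) default := by
        rw [List.getD, List.getD, List.getElem?_drop, ← hidx]
      rw [h2, h1]
      exact getD_run_last run s rest
    rw [ih ?inv, hd1, hsplit, ← hdropj]
    · -- both sides fold; reduce the B side over s :: run
      match hml : merged.getLast? with
      | some (pi, some pu) =>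
        -- extend branch
        obtain ⟨M, hM⟩ : ∃ M, merged = M ++ [(pi, some pu)] := by
          rcases List.eq_nil_or_concat merged with h | ⟨M, x, h⟩
          · simp [h] at hml
          · subst h
            simp at hml
            exact ⟨M, by simp [hml]⟩
        have hb : pvBStep merged s = M ++ [((pi.1, s.1.2), some pu)] := by
          simp [pvBStep, hs, hM]
        simp only [merged', hml, hdropj, List.foldl_cons, hb, List.foldl_append]
        rw [foldB_run_extend run hrun M pi.1 s.1.2 pu, hend, hM]
        simp
      | some (pi, none) =>
        -- invariant excludes this state
        exact absurd hs (hinv (pi, none) hml rfl hi)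
      | none =>
        -- merged = []
        have hme : merged = [] := List.getLast?_eq_none_iff.mp hml
        have hb : pvBStep merged s = [(s.1, none)] := by simp [pvBStep, hs, hme]
        simp only [merged', hml, hdropj, List.foldl_cons, hb, List.foldl_append]
        rw [foldB_run_skip run hrun s.1, hme]
        simp
    case inv =>
      -- invariant for the recursive call at j
      intro x hx hxn hjlen
      match hml : merged.getLast? with
      | some (pi, some pu) =>
        simp only [merged', hml] at hx
        rw [List.getLast?_concat] at hx
        cases hx
        simp at hxn
      | some (pi, none) => exact absurd hs (hinv (pi, none) hml rfl hi)
      | none =>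
        have hme : merged = [] := List.getLast?_eq_none_iff.mp hml
        intro hcur
        have hhead : (segs.drop j).head? = some (segs.getD j default) := by
          rw [List.drop_eq_getElem_cons hjlen, List.getD_eq_getElem segs default hjlen]
          rfl
        exact hresthead _ (hdropj ▸ hhead) hcur
  | case2 i merged hi s u hs ih =>
    intro hinv
    have hd1 : segs.drop i = s :: segs.drop (i + 1) := by
      have := List.drop_eq_getElem_cons hi
      rwa [← List.getD_eq_getElem segs default hi] at this
    have hb : pvBStep merged s = merged ++ [(s.1, some u)] := by simp [pvBStep, hs]
    rw [ih ?inv, hd1, List.foldl_cons, hb]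
    case inv =>
      intro x hx hxn
      rw [List.getLast?_concat] at hx
      cases hx
      simp at hxn
  | case3 i merged hi =>
    intro _
    rw [List.drop_eq_nil_of_le (by omega)]
    rfl

-- ===== VERDICT (by name: the statement is the Claim_ definition above) =====
theorem merge_empty_intervals_spec : Claim_equal_merge_empty_intervals := by
  intro segments duration _
  unfold Spec_merge_empty_intervals merge_empty_intervals merge_empty_intervals_alt
  by_cases hnil : segments = []
  · simp [hnil]
  · have h := aloop_eq_foldB segments 0 [] (by intro x hx; simp at hx)
    simp only [hnil, if_false, h, List.drop_zero]
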